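-- pv_equiv track=rewrite | github.com/ifahimkhan/leetcode | code/1099_solution.py | solution_all_pairs
-- ===== SOURCE A (Python) =====
-- def solution_all_pairs(A, K):
--     n = len(A)
--     S = -1
--     for i in range(n):
--         for j in range(i):
--             t = A[i] + A[j]
--             if t < K:
--                 S = max(S, t)
--     return S
-- ===== SOURCE B (Python) =====
-- def solution_all_pairs(A, K):
--     # sort, then two-pointer scan tracking the best pair-sum strictly below K
--     B = sorted(A)
--     S = -1
--     i, j = 0, len(B) - 1
--     while i < j:
--         s = B[i] + B[j]
--         if s < K:
--             if s > S:
--                 S = s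
--             i += 1
--         else:
--             j -= 1
--     return S
-- ===== Notes on version B (the rewrite author's own statement) =====
-- stated objective: faster
-- what changed: replaced the quadratic scan over all index pairs by sort-then-two-pointer scan that tracks the maximal pair sum strictly below K
import Mathlib
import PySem

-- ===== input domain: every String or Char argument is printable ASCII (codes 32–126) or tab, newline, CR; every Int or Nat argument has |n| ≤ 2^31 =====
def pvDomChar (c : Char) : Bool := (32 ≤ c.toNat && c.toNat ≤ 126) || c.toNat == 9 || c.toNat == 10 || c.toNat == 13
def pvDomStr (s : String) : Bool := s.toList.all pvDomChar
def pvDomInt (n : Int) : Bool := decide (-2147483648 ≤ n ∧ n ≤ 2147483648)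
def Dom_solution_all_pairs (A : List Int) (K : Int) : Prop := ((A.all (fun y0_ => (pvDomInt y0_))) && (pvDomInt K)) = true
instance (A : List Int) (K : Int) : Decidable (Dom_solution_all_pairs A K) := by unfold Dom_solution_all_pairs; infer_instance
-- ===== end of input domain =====

-- B replaces A's quadratic scan over all index pairs by sort + a two-pointer sweep (faster).

-- ===== PORT A =====
-- literal transliteration of A: n = len(A); S = -1; for i in range(n): for j in range(i): …
def solution_all_pairs (A : List Int) (K : Int) : Int :=
  let n : Int := A.length
  (PySem.List.pyRange 0 n 1).foldl (fun S i =>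
    (PySem.List.pyRange 0 i 1).foldl (fun S j =>
      let t := PySem.List.pyGetD A i 0 + PySem.List.pyGetD A j 0
      if t < K then max S t else S) S) (-1)

-- ===== PORT B =====
-- the while-loop of Source B; indices are Python ints, always in range while i < j
def twoPtrLoop (B : List Int) (K : Int) (i j S : Int) : Int :=
  if _h : i < j then
    let s := PySem.List.pyGetD B i 0 + PySem.List.pyGetD B j 0
    if s < K then
      twoPtrLoop B K (i + 1) j (if s > S then s else S)
    else
      twoPtrLoop B K i (j - 1) S
  else S
termination_by (j - i).toNat
decreasing_by all_goals omega

def solution_all_pairs_alt (A : List Int) (K : Int) : Int :=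
  let B := PySem.List.sorted A (fun x => x) false
  twoPtrLoop B K 0 ((B.length : Int) - 1) (-1)

-- ===== PRECONDITION & SPEC =====
def Spec_solution_all_pairs (A : List Int) (K : Int) (out : Int) : Prop := out = solution_all_pairs_alt A K
instance (A : List Int) (K : Int) (out : Int) : Decidable (Spec_solution_all_pairs A K out) := by unfold Spec_solution_all_pairs; infer_instance

-- ===== CLAIM (what is proved, stated in full; the proofs are below) =====
def Claim_equal_solution_all_pairs : Prop := ∀ (A : List Int) (K : Int), Dom_solution_all_pairs A K → Spec_solution_all_pairs A K (solution_all_pairs A K)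

-- ===== LEMMAS AND PROOFS =====

-- the multiset of pair sums A[a] + A[b], a < b
def pairsSums : List Int → List Int
  | [] => []
  | x :: xs => xs.map (fun y => x + y) ++ pairsSums xs

-- "out is the maximum pair sum below K, floored at -1"
def IsBest (L : List Int) (K out : Int) : Prop :=
  -1 ≤ out ∧ (∀ t ∈ pairsSums L, t < K → t ≤ out) ∧
    (out = -1 ∨ (out ∈ pairsSums L ∧ out < K))

theorem mem_pairsSums {L : List Int} {t : Int} :
    t ∈ pairsSums L ↔ ∃ a b, ∃ (ha : a < L.length) (hb : b < L.length),
      a < b ∧ t = L[a] + L[b] := by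
  induction L with
  | nil => simp [pairsSums]
  | cons x xs ih =>
    simp only [pairsSums, List.mem_append, List.mem_map, ih]
    constructor
    · rintro (⟨y, hy, rfl⟩ | ⟨a, b, ha, hb, hab, rfl⟩)
      · obtain ⟨b, hb, rfl⟩ := List.mem_iff_getElem.mp hy
        exact ⟨0, b + 1, by simp, by simp; omega, by omega, by simp⟩
      · exact ⟨a + 1, b + 1, by simp; omega, by simp; omega, by omega, by simp⟩
    · rintro ⟨a, b, ha, hb, hab, rfl⟩
      cases a with
      | zero =>
        obtain ⟨b', rfl⟩ : ∃ b', b = b' + 1 := ⟨b - 1, by omega⟩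
        exact Or.inl ⟨xs[b']'(by simpa using hb), List.getElem_mem _, by simp⟩
      | succ a' =>
        obtain ⟨b', rfl⟩ : ∃ b', b = b' + 1 := ⟨b - 1, by omega⟩
        exact Or.inr ⟨a', b', by simpa using ha, by simpa using hb, by omega, by simp⟩

theorem pairsSums_perm {l l' : List Int} (h : l.Perm l') :
    (pairsSums l).Perm (pairsSums l') := by
  induction h with
  | nil => rfl
  | cons x h ih => exact ((h.map _).append ih)
  | swap x y l =>
    have e1 : pairsSums (y :: x :: l)
        = (y + x) :: (List.map (fun z => y + z) l ++ (List.map (fun z => x + z) l ++ pairsSums l)) := by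
      simp [pairsSums]
    have e2 : pairsSums (x :: y :: l)
        = (x + y) :: (List.map (fun z => x + z) l ++ (List.map (fun z => y + z) l ++ pairsSums l)) := by
      simp [pairsSums]
    rw [e1, e2, add_comm y x]
    exact (List.perm_append_comm_assoc _ _ _).cons _
  | trans _ _ ih1 ih2 => exact ih1.trans ih2

theorem isBest_of_perm {l l' : List Int} {K out : Int} (h : l.Perm l') :
    IsBest l K out → IsBest l' K out := by
  intro ⟨h1, h2, h3⟩
  have hp := pairsSums_perm h
  refine ⟨h1, fun t ht hk => h2 t (hp.mem_iff.mpr ht) hk, ?_⟩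
  rcases h3 with h3 | ⟨h3, h4⟩
  · exact Or.inl h3
  · exact Or.inr ⟨hp.mem_iff.mp h3, h4⟩

theorem isBest_unique {L : List Int} {K o1 o2 : Int}
    (h1 : IsBest L K o1) (h2 : IsBest L K o2) : o1 = o2 := by
  obtain ⟨a1, b1, c1⟩ := h1
  obtain ⟨a2, b2, c2⟩ := h2
  rcases c1 with c1 | ⟨m1, k1⟩ <;> rcases c2 with c2 | ⟨m2, k2⟩
  · omega
  · have := b2 o2 m2 k2; have := b1 o2 m2 k2; omega
  · have := b2 o1 m1 k1; omega
  · have := b2 o1 m1 k1; have := b1 o2 m2 k2; omega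

-- A's running maximum as a fold over a list of candidate sums
def maxUnder (K S : Int) (l : List Int) : Int :=
  l.foldl (fun S t => if t < K then max S t else S) S

theorem maxUnder_cons (K S x : Int) (xs : List Int) :
    maxUnder K S (x :: xs) = if x < K then maxUnder K (max S x) xs else maxUnder K S xs := by
  simp only [maxUnder, List.foldl_cons]; split <;> rfl

theorem maxUnder_ge_init (K S : Int) (l : List Int) : S ≤ maxUnder K S l := by
  induction l generalizing S with
  | nil => simp [maxUnder]
  | cons x xs ih =>
    rw [maxUnder_cons]
    split
    · exact le_trans (le_max_left S x) (ih (max S x))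
    · exact ih S

theorem maxUnder_bound (K S : Int) (l : List Int) :
    ∀ t ∈ l, t < K → t ≤ maxUnder K S l := by
  induction l generalizing S with
  | nil => simp
  | cons x xs ih =>
    intro t ht hk
    rw [maxUnder_cons]
    rcases List.mem_cons.mp ht with rfl | ht
    · rw [if_pos hk]
      exact le_trans (le_max_right S t) (maxUnder_ge_init K _ xs)
    · split <;> exact ih _ t ht hk

theorem maxUnder_mem (K S : Int) (l : List Int) :
    maxUnder K S l = S ∨ (maxUnder K S l ∈ l ∧ maxUnder K S l < K) := by
  induction l generalizing S with
  | nil => simp [maxUnder]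
  | cons x xs ih =>
    rw [maxUnder_cons]
    split
    · rcases ih (max S x) with h | ⟨h1, h2⟩
      · rw [h]
        rcases max_choice S x with h' | h'
        · exact Or.inl h'
        · exact Or.inr ⟨by rw [h']; exact List.mem_cons_self .., by omega⟩
      · exact Or.inr ⟨List.mem_cons_of_mem _ h1, h2⟩
    · rcases ih S with h | ⟨h1, h2⟩
      · exact Or.inl h
      · exact Or.inr ⟨List.mem_cons_of_mem _ h1, h2⟩

theorem foldl_maxUnder (K S : Int) (l : List Int) (g : Int → List Int) :
    l.foldl (fun S i => maxUnder K S (g i)) S = maxUnder K S (l.flatMap g) := by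
  induction l generalizing S with
  | nil => simp [maxUnder]
  | cons x xs ih => simp [maxUnder, List.foldl_append] at *; rw [ih]

-- A's port computes maxUnder over the flattened list of candidate sums
theorem portA_eq (A : List Int) (K : Int) :
    solution_all_pairs A K = maxUnder K (-1)
      ((PySem.List.pyRange 0 (A.length : Int) 1).flatMap (fun i =>
        (PySem.List.pyRange 0 i 1).map (fun j =>
          PySem.List.pyGetD A i 0 + PySem.List.pyGetD A j 0))) := by
  unfold solution_all_pairs
  rw [← foldl_maxUnder]
  simp only [maxUnder, List.foldl_map]

theorem mem_flat_iff (A : List Int) (t : Int) :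
    t ∈ ((PySem.List.pyRange 0 (A.length : Int) 1).flatMap (fun i =>
        (PySem.List.pyRange 0 i 1).map (fun j =>
          PySem.List.pyGetD A i 0 + PySem.List.pyGetD A j 0))) ↔
      t ∈ pairsSums A := by
  simp only [List.mem_flatMap, List.mem_map, PySem.List.mem_pyRange_one, mem_pairsSums]
  constructor
  · rintro ⟨i, ⟨hi0, hin⟩, j, ⟨hj0, hji⟩, rfl⟩
    rw [PySem.List.pyGetD_eq_getElem A 0 hi0 (by omega), PySem.List.pyGetD_eq_getElem A 0 hj0 (by omega)]
    exact ⟨j.toNat, i.toNat, by omega, by omega, by omega, by rw [Int.add_comm]⟩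
  · rintro ⟨a, b, ha, hb, hab, rfl⟩
    refine ⟨(b : Int), ⟨by omega, by omega⟩, (a : Int), ⟨by omega, by omega⟩, ?_⟩
    rw [PySem.List.pyGetD_eq_getElem A 0 (by omega) (by omega),
        PySem.List.pyGetD_eq_getElem A 0 (by omega) (by omega)]
    simp [Int.add_comm]

theorem portA_isBest (A : List Int) (K : Int) :
    IsBest A K (solution_all_pairs A K) := by
  rw [portA_eq]
  refine ⟨maxUnder_ge_init _ _ _, ?_, ?_⟩
  · intro t ht hk
    exact maxUnder_bound K (-1) _ t ((mem_flat_iff A t).mpr ht) hk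
  · rcases maxUnder_mem K (-1) _ with h | ⟨h1, h2⟩
    · exact Or.inl h
    · exact Or.inr ⟨(mem_flat_iff A _).mp h1, h2⟩

theorem sorted_mono {L : List Int} (hs : L.Pairwise (· ≤ ·)) {p q : Nat}
    (hp : p < L.length) (hq : q < L.length) (hpq : p ≤ q) : L[p] ≤ L[q] := by
  rcases Nat.lt_or_eq_of_le hpq with h | rfl
  · exact List.pairwise_iff_getElem.mp hs p q hp hq h
  · exact le_refl _

theorem twoPtr_isBest (L : List Int) (K : Int) (hs : L.Pairwise (· ≤ ·))
    (i j S : Int) (h0 : 0 ≤ i) (hjl : j < (L.length : Int)) (hS : -1 ≤ S)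
    (hub : ∀ (a b : Nat) (ha : a < L.length) (hb : b < L.length), a < b →
      L[a] + L[b] < K → ¬(i ≤ (a : Int) ∧ (b : Int) ≤ j) → L[a] + L[b] ≤ S)
    (hmem : S = -1 ∨ ∃ a b, ∃ (ha : a < L.length) (hb : b < L.length),
      a < b ∧ S = L[a] + L[b] ∧ S < K) :
    IsBest L K (twoPtrLoop L K i j S) := by
  rw [twoPtrLoop]
  split
  case isTrue hij =>
    have hj0 : 0 ≤ j := by omega
    have hiL : i < (L.length : Int) := by omega
    rw [PySem.List.pyGetD_eq_getElem L 0 h0 hiL, PySem.List.pyGetD_eq_getElem L 0 hj0 hjl]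
    have hiN : i.toNat < L.length := by omega
    have hjN : j.toNat < L.length := by omega
    show IsBest L K
      (if L[i.toNat] + L[j.toNat] < K then
        twoPtrLoop L K (i + 1) j (if L[i.toNat] + L[j.toNat] > S then L[i.toNat] + L[j.toNat] else S)
       else twoPtrLoop L K i (j - 1) S)
    split
    case isTrue hsK =>
      refine twoPtr_isBest L K hs (i + 1) j
        (if L[i.toNat] + L[j.toNat] > S then L[i.toNat] + L[j.toNat] else S) (by omega) hjl ?_ ?_ ?_
      · split <;> omega
      · intro a b ha hb hab hk hnot
        by_cases hc : i ≤ (a : Int) ∧ (b : Int) ≤ j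
        · have hai : (a : Int) = i := by omega
          have h1 : L[a] = L[i.toNat] := by congr 1; omega
          have h2 : L[b] ≤ L[j.toNat] := sorted_mono hs hb hjN (by omega)
          split <;> omega
        · have := hub a b ha hb hab hk hc
          split <;> omega
      · split
        case isTrue h =>
          exact Or.inr ⟨i.toNat, j.toNat, hiN, hjN, by omega, rfl, hsK⟩
        case isFalse h => exact hmem
    case isFalse hsK =>
      refine twoPtr_isBest L K hs i (j - 1) S h0 (by omega) hS ?_ hmem
      intro a b ha hb hab hk hnot
      by_cases hc : i ≤ (a : Int) ∧ (b : Int) ≤ j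
      · exfalso
        have hbj : (b : Int) = j := by omega
        have h1 : L[b] = L[j.toNat] := by congr 1; omega
        have h2 : L[i.toNat] ≤ L[a] := sorted_mono hs hiN ha (by omega)
        omega
      · exact hub a b ha hb hab hk hc
  case isFalse hij =>
    refine ⟨hS, ?_, ?_⟩
    · intro t ht hk
      obtain ⟨a, b, ha, hb, hab, rfl⟩ := mem_pairsSums.mp ht
      exact hub a b ha hb hab hk (by omega)
    · rcases hmem with h | ⟨a, b, ha, hb, hab, he, hk⟩
      · exact Or.inl h
      · exact Or.inr ⟨mem_pairsSums.mpr ⟨a, b, ha, hb, hab, he⟩, hk⟩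
termination_by (j - i).toNat
decreasing_by all_goals omega

theorem portB_isBest (A : List Int) (K : Int) :
    IsBest A K (solution_all_pairs_alt A K) := by
  unfold solution_all_pairs_alt
  have hperm := PySem.List.sorted_perm A (fun x => x) false
  have hpw : (PySem.List.sorted A (fun x => x) false).Pairwise (· ≤ ·) := by
    simpa using PySem.List.sorted_pairwise A (fun x => x)
  apply isBest_of_perm hperm
  refine twoPtr_isBest _ K hpw 0 _ (-1) (by omega) (by omega) (by omega) ?_ (Or.inl rfl)
  intro a b ha hb hab hk hnot
  exact absurd ⟨by omega, by omega⟩ hnot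

-- ===== VERDICT (by name: the statement is the Claim_ definition above) =====
theorem solution_all_pairs_spec : Claim_equal_solution_all_pairs := by
  intro A K _
  unfold Spec_solution_all_pairs
  exact isBest_unique (portA_isBest A K) (portB_isBest A K)
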